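-- pv_equiv track=rewrite | github.com/pratikalwaysrocks/Wadi-IPL-2026 | ipl_stats_scraper.py | find_block_after_header
-- ===== SOURCE A (Python) =====
-- def find_block_after_header(lines: list[str], header_keywords: list[str], stop_keywords: list[str]) -> list[str]:
--     start_idx = None
--
--     for i, line in enumerate(lines):
--         lower = line.lower()
--         if all(k.lower() in lower for k in header_keywords):
--             start_idx = i + 1
--             break
--
--     if start_idx is None:
--         return []
--
--     end_idx = len(lines)
--     for i in range(start_idx, len(lines)):
--         lower = lines[i].lower()
--         if any(stop.lower() in lower for stop in stop_keywords):
--             end_idx = i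
--             break
--
--     return lines[start_idx:end_idx]
-- ===== SOURCE B (Python) =====
-- def find_block_after_header(lines: list[str], header_keywords: list[str], stop_keywords: list[str]) -> list[str]:
--     hks = [k.lower() for k in header_keywords]
--     sks = [s.lower() for s in stop_keywords]
--     out = []
--     collecting = False
--     for line in lines:
--         low = line.lower()
--         if not collecting:
--             if all(k in low for k in hks):
--                 collecting = True
--         else:
--             if any(s in low for s in sks):
--                 break
--             out.append(line)
--     return out
-- ===== Notes on version B (the rewrite author's own statement) =====
-- stated objective: simpler
-- what changed: Replaced the index-based two-loop-plus-slice structure (find start index, find end index, slice) with a single pass over the lines using a collecting flag and precomputed lowercased keywords; no indices or slicing.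
import Mathlib
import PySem

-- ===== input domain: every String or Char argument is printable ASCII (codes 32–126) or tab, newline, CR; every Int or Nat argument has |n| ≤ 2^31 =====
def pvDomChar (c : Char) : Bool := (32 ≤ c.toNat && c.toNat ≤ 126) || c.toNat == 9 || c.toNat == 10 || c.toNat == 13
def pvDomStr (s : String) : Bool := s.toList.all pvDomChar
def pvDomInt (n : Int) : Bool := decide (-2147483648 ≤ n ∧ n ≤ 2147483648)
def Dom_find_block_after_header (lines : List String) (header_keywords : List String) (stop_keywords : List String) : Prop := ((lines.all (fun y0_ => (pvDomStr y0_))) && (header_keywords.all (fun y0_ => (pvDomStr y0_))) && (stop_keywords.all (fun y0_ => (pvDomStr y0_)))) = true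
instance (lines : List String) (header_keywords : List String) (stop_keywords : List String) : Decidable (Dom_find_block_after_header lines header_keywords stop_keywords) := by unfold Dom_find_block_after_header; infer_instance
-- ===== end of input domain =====

-- B replaces A's two index loops plus a slice by a single recursive pass with a
-- collecting phase and precomputed lowercased keywords (same cost, simpler structure).

-- ===== PORT A =====
-- first loop: for i, line in enumerate(lines): if all(k.lower() in line.lower() ...): start_idx = i+1; break
def fbahFirst (hks : List String) : List String → Nat → Option Nat
  | [], _ => none
  | line :: rest, i =>
      let lower := PySem.Str.lower line
      if hks.all (fun k => PySem.Str.isIn (PySem.Str.lower k) lower) then some (i + 1)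
      else fbahFirst hks rest (i + 1)

-- second loop: for i in range(start_idx, len(lines)): if any(stop.lower() in lines[i].lower() ...): end_idx = i; break
def fbahFindEnd (lines : List String) (sks : List String) (i : Nat) : Nat :=
  if _h : i < lines.length then
    let lower := PySem.Str.lower (lines.getD i "")
    if sks.any (fun stop => PySem.Str.isIn (PySem.Str.lower stop) lower) then i
    else fbahFindEnd lines sks (i + 1)
  else lines.length
termination_by lines.length - i

def find_block_after_header (lines : List String) (header_keywords : List String) (stop_keywords : List String) : List String :=
  match fbahFirst header_keywords lines 0 with
  | none => []
  | some start_idx =>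
      let end_idx := fbahFindEnd lines stop_keywords start_idx
      PySem.List.slice lines (some (start_idx : Int)) (some (end_idx : Int))

-- ===== PORT B =====
def fbahCollect (sksL : List String) : List String → List String
  | [] => []
  | line :: rest =>
      let low := PySem.Str.lower line
      if sksL.any (fun s => PySem.Str.isIn s low) then []
      else line :: fbahCollect sksL rest

def fbahSeek (hksL sksL : List String) : List String → List String
  | [] => []
  | line :: rest =>
      let low := PySem.Str.lower line
      if hksL.all (fun k => PySem.Str.isIn k low) then fbahCollect sksL rest
      else fbahSeek hksL sksL rest

def find_block_after_header_alt (lines : List String) (header_keywords : List String) (stop_keywords : List String) : List String :=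
  fbahSeek (header_keywords.map PySem.Str.lower) (stop_keywords.map PySem.Str.lower) lines

-- ===== PRECONDITION & SPEC =====
def Spec_find_block_after_header (lines : List String) (header_keywords : List String) (stop_keywords : List String) (out : List String) : Prop := out = find_block_after_header_alt lines header_keywords stop_keywords
instance (lines : List String) (header_keywords : List String) (stop_keywords : List String) (out : List String) : Decidable (Spec_find_block_after_header lines header_keywords stop_keywords out) := by unfold Spec_find_block_after_header; infer_instance

-- ===== CLAIM (what is proved, stated in full; the proofs are below) =====
def Claim_equal_find_block_after_header : Prop := ∀ (lines : List String) (header_keywords : List String) (stop_keywords : List String), Dom_find_block_after_header lines header_keywords stop_keywords → Spec_find_block_after_header lines header_keywords stop_keywords (find_block_after_header lines header_keywords stop_keywords)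

-- ===== LEMMAS AND PROOFS =====

theorem fbahFindEnd_ge (lines sks : List String) (i : Nat) (hi : i ≤ lines.length) :
    i ≤ fbahFindEnd lines sks i ∧ fbahFindEnd lines sks i ≤ lines.length := by
  rw [fbahFindEnd]
  split
  · dsimp only
    split
    · exact ⟨le_refl _, by omega⟩
    · rename_i h _
      have := fbahFindEnd_ge lines sks (i + 1) (by omega)
      exact ⟨by omega, this.2⟩
  · exact ⟨by omega, le_refl _⟩
termination_by lines.length - i

-- the second loop + slice computed from position i equals B's collect phase on the suffix
theorem fbahEnd_collect (lines sks : List String) (i : Nat) (hi : i ≤ lines.length) :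
    (lines.drop i).take (fbahFindEnd lines sks i - i)
      = fbahCollect (sks.map PySem.Str.lower) (lines.drop i) := by
  rw [fbahFindEnd]
  split
  · rename_i h
    have hdrop : lines.drop i = lines[i] :: lines.drop (i + 1) := List.drop_eq_getElem_cons h
    have hget : lines.getD i "" = lines[i] := by
      simp [List.getD, List.getElem?_eq_getElem h]
    rw [hdrop]
    dsimp only
    rw [hget, fbahCollect]
    have hcond : ((sks.map PySem.Str.lower).any fun s => PySem.Str.isIn s (PySem.Str.lower lines[i]))
        = sks.any fun stop => PySem.Str.isIn (PySem.Str.lower stop) (PySem.Str.lower lines[i]) := by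
      simp [List.any_map, Function.comp_def, pysem]
    by_cases hc : (sks.any fun stop => PySem.Str.isIn (PySem.Str.lower stop) (PySem.Str.lower lines[i])) = true
    · rw [if_pos hc, if_pos (hcond.trans hc)]
      simp
    · rw [if_neg hc, if_neg (by rw [hcond]; exact hc)]
      have hge := (fbahFindEnd_ge lines sks (i + 1) (by omega)).1
      have hs : fbahFindEnd lines sks (i + 1) - i = (fbahFindEnd lines sks (i + 1) - (i + 1)) + 1 := by omega
      rw [hs, List.take_succ_cons, fbahEnd_collect lines sks (i + 1) (by omega)]
  · rename_i h
    have : i = lines.length := by omega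
    simp [this, List.drop_length, fbahCollect]
termination_by lines.length - i

-- the first loop (+ dispatch) from position i equals B's seek phase on the suffix
theorem fbahFirst_seek (hks sks lines : List String) (i : Nat) (rest : List String)
    (hrest : lines.drop i = rest) :
    (match fbahFirst hks rest i with
     | none => ([] : List String)
     | some s => PySem.List.slice lines (some (s : Int)) (some ((fbahFindEnd lines sks s : Nat) : Int)))
      = fbahSeek (hks.map PySem.Str.lower) (sks.map PySem.Str.lower) rest := by
  induction rest generalizing i with
  | nil => simp [fbahFirst, fbahSeek]
  | cons line rest' ih =>
    have hi : i < lines.length := by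
      by_contra hcon
      have hle : lines.length ≤ i := by omega
      rw [List.drop_eq_nil_of_le hle] at hrest
      simp at hrest
    have hdrop : lines.drop i = lines[i] :: lines.drop (i + 1) := List.drop_eq_getElem_cons hi
    rw [hrest] at hdrop
    have hrest' : lines.drop (i + 1) = rest' := (List.cons.injEq _ _ _ _ ▸ hdrop).2.symm
    have hcond : ((hks.map PySem.Str.lower).all fun k => PySem.Str.isIn k (PySem.Str.lower line))
        = hks.all fun k => PySem.Str.isIn (PySem.Str.lower k) (PySem.Str.lower line) := by
      simp [List.all_map, Function.comp_def, pysem]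
    rw [fbahSeek]
    by_cases hh : (hks.all fun k => PySem.Str.isIn (PySem.Str.lower k) (PySem.Str.lower line)) = true
    · have hf : fbahFirst hks (line :: rest') i = some (i + 1) := by
        rw [fbahFirst]; simp only [hh, if_true]
      rw [hf, if_pos (hcond.trans hh)]
      dsimp only
      rw [PySem.List.slice_natCast, fbahEnd_collect lines sks (i + 1) (by omega), hrest']
    · have hf : fbahFirst hks (line :: rest') i = fbahFirst hks rest' (i + 1) := by
        rw [fbahFirst]; rw [if_neg hh]
      rw [hf, if_neg (by rw [hcond]; exact hh)]
      exact ih (i + 1) hrest'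

-- ===== VERDICT (by name: the statement is the Claim_ definition above) =====
theorem find_block_after_header_spec : Claim_equal_find_block_after_header := by
  intro lines hks sks _
  unfold Spec_find_block_after_header find_block_after_header find_block_after_header_alt
  exact fbahFirst_seek hks sks lines 0 lines (by simp)
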